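-- pv_equiv track=rewrite | github.com/fonsi16/IA_Fig_UMA | jogo.py | conta_bolas
-- ===== SOURCE A (Python) =====
-- def conta_bolas(num_total):
--     res=[]
--     while 1:
--         # Se o numero total de peças for maior ou igual a 16, adiciona 16 ao array de figuras e subtrai 16 ao numero total de peças
--         if num_total>=16:
--             res.append(16)
--             num_total=num_total-16
--         else:
--             # Se é possível fazer a bola mais pequena
--             if num_total>=4:
--                 # Calcula qual o tamanho da bola
--                 resto = num_total%4
--                 # Se o resto for diferente de 0, adiciona o total menos o resto ao array de figuras e subtrai o resto ao numero total de peças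
--                 # Quer dizer que tem um número de peças que não é exato para fazer uma figura de bola
--                 if resto != 0:
--                     res.append(num_total - resto)
--                     num_total = resto
--                 # Se o resto for 0, adiciona o total ao array de figuras e acaba a função
--                 else:
--                     res.append(num_total)
--                     break
--             # Se não for possível fazer a bola mais pequena, acaba a função
--             else:
--                 break
--     return res
-- ===== SOURCE B (Python) =====
-- def conta_bolas(num_total):
--     if num_total < 4:
--         return []
--     k, leftover = divmod(num_total, 16)
--     res = [16] * k
--     if leftover >= 4:
--         res.append(4 * (leftover // 4))
--     return res
-- ===== Notes on version B (the rewrite author's own statement) =====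
-- stated objective: simpler
-- what changed: Replaces the iterative stripping of 16s (and the iterated remainder handling) with a single divmod: [16]*(n//16) plus one trailing ball 4*(leftover//4) when leftover >= 4.
import Mathlib
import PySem

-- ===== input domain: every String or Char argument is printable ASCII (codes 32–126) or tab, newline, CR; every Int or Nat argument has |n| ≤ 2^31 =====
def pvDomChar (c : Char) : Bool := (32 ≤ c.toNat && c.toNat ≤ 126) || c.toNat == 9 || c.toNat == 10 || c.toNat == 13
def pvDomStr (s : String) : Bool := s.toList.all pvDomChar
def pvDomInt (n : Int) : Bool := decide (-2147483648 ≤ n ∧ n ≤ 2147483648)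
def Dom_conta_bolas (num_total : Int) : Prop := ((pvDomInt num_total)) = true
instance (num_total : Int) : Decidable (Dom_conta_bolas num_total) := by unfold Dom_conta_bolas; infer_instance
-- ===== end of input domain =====

-- B replaces A's iterative stripping of 16s with a single divmod closed form (objective: simpler).


-- ===== PORT A =====
-- A's while-loop: strip 16s, then one or two smaller-ball steps; terminates since num_total decreases.
def conta_bolas_go (res : List Int) (num_total : Int) : List Int :=
  if h16 : num_total ≥ 16 then
    conta_bolas_go (res ++ [16]) (num_total - 16)
  else if _h4 : num_total ≥ 4 then
    let resto := PySem.Int.mod num_total 4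
    if _hr : resto ≠ 0 then
      conta_bolas_go (res ++ [num_total - resto]) resto
    else
      res ++ [num_total]
  else
    res
termination_by num_total.toNat
decreasing_by
  · omega
  · have h0 := PySem.Int.mod_nonneg num_total (b := 4) (by omega)
    have h1 := PySem.Int.mod_lt num_total (b := 4) (by omega)
    omega

def conta_bolas (num_total : Int) : List Int := conta_bolas_go [] num_total

-- ===== PORT B =====
def conta_bolas_alt (num_total : Int) : List Int :=
  if num_total < 4 then []
  else
    let k := PySem.Int.floordiv num_total 16
    let leftover := PySem.Int.mod num_total 16
    let res := List.replicate k.toNat 16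
    if leftover ≥ 4 then res ++ [4 * PySem.Int.floordiv leftover 4]
    else res

-- ===== PRECONDITION & SPEC =====
def Spec_conta_bolas (num_total : Int) (out : List Int) : Prop := out = conta_bolas_alt num_total
instance (num_total : Int) (out : List Int) : Decidable (Spec_conta_bolas num_total out) := by unfold Spec_conta_bolas; infer_instance

-- ===== CLAIM (what is proved, stated in full; the proofs are below) =====
def Claim_equal_conta_bolas : Prop := ∀ (num_total : Int), Dom_conta_bolas num_total → Spec_conta_bolas num_total (conta_bolas num_total)

-- ===== LEMMAS AND PROOFS =====

theorem conta_bolas_go_eq (res : List Int) (n : Int) :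
    conta_bolas_go res n = res ++ conta_bolas_alt n := by
  induction res, n using conta_bolas_go.induct with
  | case1 res n h16 ih =>
    rw [conta_bolas_go, dif_pos h16, ih]
    suffices h : conta_bolas_alt n = 16 :: conta_bolas_alt (n - 16) by simp [h]
    simp only [conta_bolas_alt, PySem.Int.floordiv_eq_ediv_of_pos (by omega : (0:Int) < 16),
      PySem.Int.floordiv_eq_ediv_of_pos (by omega : (0:Int) < 4),
      PySem.Int.mod_eq_emod_of_pos (by omega : (0:Int) < 16)]
    have hmod : (n - 16) % 16 = n % 16 := by omega
    have hk : (n / 16).toNat = ((n - 16) / 16).toNat + 1 := by omega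
    rw [if_neg (by omega : ¬ n < 4), hmod, hk, List.replicate_succ]
    by_cases hsmall : n - 16 < 4
    · have hm : n % 16 = n - 16 := by omega
      rw [if_pos hsmall, if_neg (by omega : ¬ n % 16 ≥ 4)]
      have : ((n - 16) / 16).toNat = 0 := by omega
      simp [this]
    · rw [if_neg hsmall]
      split <;> simp
  | case2 res n h16 h4 resto hresto ih =>
    rw [conta_bolas_go, dif_neg h16, dif_pos h4, dif_pos hresto, ih]
    have he : resto = n % 4 := by
      show PySem.Int.mod n 4 = n % 4
      rw [PySem.Int.mod_eq_emod_of_pos (by omega)]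
    have h0 : (0:Int) ≤ n % 4 := by omega
    have h1 : n % 4 < 4 := by omega
    have hrne : n % 4 ≠ 0 := by rw [← he]; exact hresto
    simp only [conta_bolas_alt, PySem.Int.floordiv_eq_ediv_of_pos (by omega : (0:Int) < 16),
      PySem.Int.floordiv_eq_ediv_of_pos (by omega : (0:Int) < 4),
      PySem.Int.mod_eq_emod_of_pos (by omega : (0:Int) < 16), he]
    rw [if_pos (by omega : n % 4 < 4), if_neg (by omega : ¬ n < 4)]
    have hk0 : (n / 16).toNat = 0 := by omega
    have hl : n % 16 = n := by omega
    rw [hk0, hl, if_pos h4]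
    have h44 : 4 * (n / 4) = n - n % 4 := by omega
    simp [h44]
  | case3 res n h16 h4 resto hresto =>
    rw [conta_bolas_go, dif_neg h16, dif_pos h4, dif_neg hresto]
    have he : resto = n % 4 := by
      show PySem.Int.mod n 4 = n % 4
      rw [PySem.Int.mod_eq_emod_of_pos (by omega)]
    have hr0 : n % 4 = 0 := by rw [← he]; simpa using hresto
    simp only [conta_bolas_alt, PySem.Int.floordiv_eq_ediv_of_pos (by omega : (0:Int) < 16),
      PySem.Int.floordiv_eq_ediv_of_pos (by omega : (0:Int) < 4),
      PySem.Int.mod_eq_emod_of_pos (by omega : (0:Int) < 16)]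
    rw [if_neg (by omega : ¬ n < 4)]
    have hk0 : (n / 16).toNat = 0 := by omega
    have hl : n % 16 = n := by omega
    have h44 : 4 * (n / 4) = n := by omega
    rw [hk0, hl, if_pos h4, h44]
    simp
  | case4 res n h16 h4 =>
    rw [conta_bolas_go, dif_neg h16, dif_neg h4, conta_bolas_alt, if_pos (by omega)]
    simp

-- ===== VERDICT (by name: the statement is the Claim_ definition above) =====
theorem conta_bolas_spec : Claim_equal_conta_bolas := by
  intro n _
  show conta_bolas n = conta_bolas_alt n
  simpa using conta_bolas_go_eq [] n
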